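-- pv_equiv track=rewrite | github.com/tomasgpastore/lectura-app | ai-services/pdf-project/app/pipeline/inbound/chunking/chunking.py | get_page_numbers
-- ===== SOURCE A (Python) =====
-- def get_page_numbers(char_start: int, char_end: int, page_markers: dict, total_pages: int) -> tuple[int, int]:
--     """
--     Determines which pages a chunk spans based on character positions.
--     """
--     if not page_markers:
--         return 1, 1
--
--     page_start = 1
--     page_end = total_pages
--
--     # Find start page
--     for pos, page in sorted(page_markers.items()):
--         if char_start < pos:
--             break
--         page_start = page
--
--     # Find end page
--     for pos, page in sorted(page_markers.items()):
--         if char_end <= pos: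
--             page_end = page - 1
--             break
--         page_end = page
--
--     return page_start, max(page_start, page_end)
-- ===== SOURCE B (Python) =====
-- def _bisect_right(a, x):
--     lo, hi = 0, len(a)
--     while lo < hi:
--         mid = (lo + hi) // 2
--         if a[mid] <= x:
--             lo = mid + 1
--         else:
--             hi = mid
--     return lo
--
--
-- def _bisect_left(a, x):
--     lo, hi = 0, len(a)
--     while lo < hi:
--         mid = (lo + hi) // 2
--         if a[mid] < x:
--             lo = mid + 1
--         else:
--             hi = mid
--     return lo
--
--
-- def get_page_numbers(char_start: int, char_end: int, page_markers: dict, total_pages: int) -> tuple[int, int]: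
--     if not page_markers:
--         return 1, 1
--     items = sorted(page_markers.items())
--     positions = [p for p, _ in items]
--     r = _bisect_right(positions, char_start)
--     page_start = items[r - 1][1] if r > 0 else 1
--     j = _bisect_left(positions, char_end)
--     page_end = items[j][1] - 1 if j < len(items) else items[-1][1]
--     return page_start, max(page_start, page_end)
-- ===== Notes on version B (the rewrite author's own statement) =====
-- stated objective: faster
-- what changed: B sorts the marker items once and finds the start/end pages by two hand-written binary searches (bisect_right for the start, bisect_left for the end) instead of A's two full linear scans over two separately sorted copies.
import Mathlib
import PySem

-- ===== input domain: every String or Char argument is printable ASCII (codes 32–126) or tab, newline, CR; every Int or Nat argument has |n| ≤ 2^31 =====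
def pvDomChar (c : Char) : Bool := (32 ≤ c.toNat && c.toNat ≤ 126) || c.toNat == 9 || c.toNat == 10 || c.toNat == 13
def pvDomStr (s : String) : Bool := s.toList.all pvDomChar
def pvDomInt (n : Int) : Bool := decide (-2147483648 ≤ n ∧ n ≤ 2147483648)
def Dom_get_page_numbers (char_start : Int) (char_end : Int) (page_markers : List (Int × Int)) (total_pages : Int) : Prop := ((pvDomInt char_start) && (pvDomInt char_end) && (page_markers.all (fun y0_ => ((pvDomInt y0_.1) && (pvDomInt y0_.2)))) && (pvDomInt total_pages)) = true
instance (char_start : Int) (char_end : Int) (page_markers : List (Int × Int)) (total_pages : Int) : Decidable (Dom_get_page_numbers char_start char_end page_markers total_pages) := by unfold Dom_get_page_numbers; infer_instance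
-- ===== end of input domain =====

-- B replaces A's two full linear scans over two separately sorted copies by one sort plus two
-- binary searches (bisect_right for the start page, bisect_left for the end page).
-- page_markers is a Python dict, so its keys are distinct and sorted(items()) is sorting by key.

-- ===== PORT A =====
-- A's first for-loop (with break): 'if char_start < pos: break; page_start = page'
def pvFindStart (cs : Int) : List (Int × Int) → Int → Int
  | [], acc => acc
  | (pos, page) :: t, acc => if cs < pos then acc else pvFindStart cs t page

-- A's second for-loop (with break): 'if char_end <= pos: page_end = page - 1; break; page_end = page'
def pvFindEnd (ce : Int) : List (Int × Int) → Int → Int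
  | [], acc => acc
  | (pos, page) :: t, _acc => if ce ≤ pos then page - 1 else pvFindEnd ce t page

def get_page_numbers (char_start : Int) (char_end : Int) (page_markers : List (Int × Int)) (total_pages : Int) : Int × Int :=
  if page_markers = [] then (1, 1)
  else
    -- sorted(page_markers.items()): keys of a dict are distinct, so sorting by key is exact
    let ps := pvFindStart char_start (PySem.List.sorted page_markers (fun kv => kv.1) false) 1
    let pe := pvFindEnd char_end (PySem.List.sorted page_markers (fun kv => kv.1) false) total_pages
    (ps, max ps pe)

-- ===== PORT B =====
def get_page_numbers_alt (char_start : Int) (char_end : Int) (page_markers : List (Int × Int)) (_total_pages : Int) : Int × Int :=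
  if page_markers = [] then (1, 1)
  else
    let items := PySem.List.sorted page_markers (fun kv => kv.1) false
    let positions := items.map Prod.fst
    -- Source B's _bisect_right/_bisect_left are verbatim the stdlib bisect loops; ported as the PySem primitives (exact)
    let r := PySem.List.bisectRight positions char_start
    let page_start := if 0 < r then (PySem.List.pyGetD items ((r : Int) - 1) (0, 0)).2 else 1
    let j := PySem.List.bisectLeft positions char_end
    let page_end := if j < items.length then (PySem.List.pyGetD items ((j : Int)) (0, 0)).2 - 1
                    else (PySem.List.pyGetD items (-1) (0, 0)).2   -- items[-1]
    (page_start, max page_start page_end)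

-- ===== PRECONDITION & SPEC =====
def Spec_get_page_numbers (char_start : Int) (char_end : Int) (page_markers : List (Int × Int)) (total_pages : Int) (out : Int × Int) : Prop := out = get_page_numbers_alt char_start char_end page_markers total_pages
instance (char_start : Int) (char_end : Int) (page_markers : List (Int × Int)) (total_pages : Int) (out : Int × Int) : Decidable (Spec_get_page_numbers char_start char_end page_markers total_pages out) := by unfold Spec_get_page_numbers; infer_instance

-- ===== CLAIM (what is proved, stated in full; the proofs are below) =====
def Claim_equal_get_page_numbers : Prop := ∀ (char_start : Int) (char_end : Int) (page_markers : List (Int × Int)) (total_pages : Int), Dom_get_page_numbers char_start char_end page_markers total_pages → Spec_get_page_numbers char_start char_end page_markers total_pages (get_page_numbers char_start char_end page_markers total_pages)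

-- ===== LEMMAS AND PROOFS =====

-- pvFindStart at a split point r (firsts ≤ cs strictly below r, > cs from r on):
-- it returns the page of the last item below r, or the accumulator if r = 0.
theorem pvFindStart_split (cs : Int) (s : List (Int × Int)) (acc : Int) (r : Nat)
    (hr : r ≤ s.length)
    (h1 : ∀ (j : Nat) (hj : j < s.length), j < r → (s[j]).1 ≤ cs)
    (h2 : ∀ (j : Nat) (hj : j < s.length), r ≤ j → cs < (s[j]).1) :
    pvFindStart cs s acc = if r = 0 then acc else (s.getD (r - 1) (0, 0)).2 := by
  induction s generalizing acc r with
  | nil =>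
    simp at hr
    simp [pvFindStart, hr]
  | cons hd t ih =>
    obtain ⟨p, g⟩ := hd
    by_cases hlt : cs < p
    · have hr0 : r = 0 := by
        by_contra h
        have := h1 0 (by simp) (by omega)
        simp at this; omega
      simp [pvFindStart, hlt, hr0]
    · have hr0 : 0 < r := by
        by_contra h
        have := h2 0 (by simp) (by omega)
        simp at this; omega
      have step : pvFindStart cs ((p, g) :: t) acc = pvFindStart cs t g := by
        simp [pvFindStart, hlt]
      rw [step, ih g (r - 1) (by simp at hr; omega)
        (fun j hj hjr => by
          have := h1 (j + 1) (by simp; omega) (by omega)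
          simpa using this)
        (fun j hj hjr => by
          have := h2 (j + 1) (by simp; omega) (by omega)
          simpa using this)]
      rcases Nat.eq_or_lt_of_le hr0 with h1r | h1r
      · simp [← h1r]
      · have : r - 1 ≠ 0 := by omega
        simp only [this, if_false, hr0.ne', if_false]
        have : r - 1 = (r - 2) + 1 := by omega
        rw [this]
        simp

-- pvFindEnd at a split point j (firsts < ce strictly below j, ≥ ce from j on):
-- it returns page-1 of item j if it exists, else the last page (or the accumulator on []).
theorem pvFindEnd_split (ce : Int) (s : List (Int × Int)) (acc : Int) (j : Nat)
    (hj : j ≤ s.length)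
    (h1 : ∀ (k : Nat) (hk : k < s.length), k < j → (s[k]).1 < ce)
    (h2 : ∀ (k : Nat) (hk : k < s.length), j ≤ k → ce ≤ (s[k]).1) :
    pvFindEnd ce s acc = if j < s.length then (s.getD j (0, 0)).2 - 1
      else if s = [] then acc else (s.getD (s.length - 1) (0, 0)).2 := by
  induction s generalizing acc j with
  | nil => simp [pvFindEnd]
  | cons hd t ih =>
    obtain ⟨p, g⟩ := hd
    by_cases hle : ce ≤ p
    · have hj0 : j = 0 := by
        by_contra h
        have := h1 0 (by simp) (by omega)
        simp at this; omega
      simp [pvFindEnd, hle, hj0]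
    · have hj0 : 0 < j := by
        by_contra h
        have := h2 0 (by simp) (by omega)
        simp at this; omega
      have step : pvFindEnd ce ((p, g) :: t) acc = pvFindEnd ce t g := by
        simp [pvFindEnd, hle]
      rw [step, ih g (j - 1) (by simp at hj; omega)
        (fun k hk hkj => by
          have := h1 (k + 1) (by simp; omega) (by omega)
          simpa using this)
        (fun k hk hkj => by
          have := h2 (k + 1) (by simp; omega) (by omega)
          simpa using this)]
      by_cases hin : j < t.length + 1
      · have hin' : j - 1 < t.length := by omega
        simp only [List.length_cons, hin, if_true, hin', if_true]
        have : j = (j - 1) + 1 := by omega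
        rw [this, List.getD_cons_succ]
        simp
      · have hin' : ¬ (j - 1 < t.length) := by omega
        simp only [List.length_cons, hin, if_false, hin', if_false]
        rcases t with _ | ⟨hd', t'⟩
        · simp
        · simp only [List.length_cons]
          have h2' : ¬ ((hd' :: t') = ([] : List (Int × Int))) := by simp
          simp only [h2', if_false, List.cons_ne_nil, if_false]
          have : t'.length + 1 + 1 - 1 = (t'.length + 1 - 1) + 1 := by omega
          rw [this, List.getD_cons_succ]

-- ===== VERDICT (by name: the statement is the Claim_ definition above) =====
theorem get_page_numbers_spec : Claim_equal_get_page_numbers := by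
  intro char_start char_end page_markers total_pages _hdom
  unfold Spec_get_page_numbers get_page_numbers get_page_numbers_alt
  by_cases hnil : page_markers = []
  · simp [hnil]
  · simp only [hnil, if_false]
    set s := PySem.List.sorted page_markers (fun kv => kv.1) false with hs
    have hsne : s ≠ [] := by
      rw [hs, Ne, PySem.List.sorted_eq_nil_iff]; exact hnil
    have hpw : (s.map Prod.fst).Pairwise (· ≤ ·) := by
      rw [List.pairwise_map]
      exact PySem.List.sorted_pairwise page_markers (fun kv => kv.1)
    have hlen : (s.map Prod.fst).length = s.length := by simp
    -- start page
    obtain ⟨hrle, hr1, hr2⟩ := PySem.List.bisectRight_spec (s.map Prod.fst) char_start hpw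
    set r := PySem.List.bisectRight (s.map Prod.fst) char_start with hrdef
    have hstart := pvFindStart_split char_start s 1 r (by omega)
      (fun k hk hkr => by
        have := hr1 k (by omega) hkr
        simpa using this)
      (fun k hk hkr => by
        have := hr2 k (by omega) hkr
        simpa using this)
    -- end page
    obtain ⟨hjle, hl1, hl2⟩ := PySem.List.bisectLeft_spec (s.map Prod.fst) char_end hpw
    set j := PySem.List.bisectLeft (s.map Prod.fst) char_end with hjdef
    have hend := pvFindEnd_split char_end s total_pages j (by omega)
      (fun k hk hkj => by
        have := hl1 k (by omega) hkj
        simpa using this)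
      (fun k hk hkj => by
        have := hl2 k (by omega) hkj
        simpa using this)
    rw [hstart, hend]
    congr 1
    · -- start components equal
      by_cases hr0 : r = 0
      · simp [hr0]
      · have h0r : 0 < r := by omega
        simp only [hr0, if_false, h0r, if_true]
        have : ((r : Int) - 1) = ((r - 1 : Nat) : Int) := by omega
        rw [this, PySem.List.pyGetD_natCast]
    · -- max of ends equal
      congr 1
      · by_cases hr0 : r = 0
        · simp [hr0]
        · have h0r : 0 < r := by omega
          simp only [hr0, if_false, h0r, if_true]
          have : ((r : Int) - 1) = ((r - 1 : Nat) : Int) := by omega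
          rw [this, PySem.List.pyGetD_natCast]
      · by_cases hjin : j < s.length
        · simp only [hjin, if_true, PySem.List.pyGetD_natCast]
        · simp only [hjin, if_false, hsne, if_false]
          -- items[-1] = items.getD (length - 1)
          have hslen : 0 < s.length := List.length_pos_iff.mpr hsne
          have : PySem.List.pyGetD s (-1) (0, 0) = s.getD (s.length - 1) (0, 0) := by
            have h1 : 1 ≤ s.length := hslen
            have h2 : s.length - 1 < s.length := by omega
            simp [PySem.List.pyGetD, PySem.List.pyGet?, PySem.List.pyIdx?, h1,
              List.getD_eq_getElem?_getD, List.getElem?_eq_getElem h2]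
          rw [this]
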